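-- pv_equiv track=rewrite | github.com/haimlab/HIV | src/Flu/AnalyzeSequences.py | findZSites
-- ===== SOURCE A (Python) =====
-- def findZSites(correctSeq):
--     oneAgo = False
--     twoAgo = False
--     nSites = {0}
--     loc = 0
--     for l in correctSeq:
--         if twoAgo:
--             if l == 'S' or l == 'T':
--                 nSites.add(loc)
--             twoAgo = False
--         if oneAgo:
--             twoAgo = True
--             oneAgo = False
--         if l == 'N':
--             oneAgo = True
--         loc += 1
--
--     nSites.remove(0)
--     return nSites
-- ===== SOURCE B (Python) =====
-- def findZSites(correctSeq):
--     # Pair each residue with the one two positions later; a sequon N-X-[ST]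
--     # registers the position of the S/T.
--     return {i + 2 for i, (a, c) in enumerate(zip(correctSeq, correctSeq[2:]))
--             if a == 'N' and c in ('S', 'T')}
-- ===== Notes on version B (the rewrite author's own statement) =====
-- stated objective: idiomatic
-- what changed: Replaced the carried-flag finite-state loop (oneAgo/twoAgo booleans plus a sentinel {0} that is removed at the end) by a one-line set comprehension over zip(seq, seq[2:]) that directly tests each N..[ST] pair.
import Mathlib
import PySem

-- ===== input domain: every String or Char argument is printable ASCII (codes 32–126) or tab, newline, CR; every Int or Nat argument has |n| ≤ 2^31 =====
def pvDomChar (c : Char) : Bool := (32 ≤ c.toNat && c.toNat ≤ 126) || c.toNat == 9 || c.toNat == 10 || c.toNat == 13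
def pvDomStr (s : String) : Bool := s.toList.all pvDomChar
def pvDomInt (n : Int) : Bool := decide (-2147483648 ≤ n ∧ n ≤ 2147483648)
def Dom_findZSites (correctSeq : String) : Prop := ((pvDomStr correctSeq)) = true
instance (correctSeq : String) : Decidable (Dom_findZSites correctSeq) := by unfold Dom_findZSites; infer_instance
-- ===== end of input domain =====

-- B replaces A's carried-flag state machine (oneAgo/twoAgo plus the {0} sentinel removed at
-- the end) by a set comprehension over zip(seq, seq[2:]); same cost, more idiomatic.

-- ===== PORT A =====
-- loop body of A: the two flag updates and the conditional Set.add, in source order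
def findZSitesStep (st : Bool × Bool × PySem.Set Int × Int) (l : Char) :
    Bool × Bool × PySem.Set Int × Int :=
  match st with
  | (oneAgo, twoAgo, nSites, loc) =>
    let nSites := if twoAgo then
        (if l == 'S' || l == 'T' then PySem.Set.add nSites loc else nSites)
      else nSites
    let twoAgo := if twoAgo then false else twoAgo
    let p := if oneAgo then (false, true) else (oneAgo, twoAgo)
    let oneAgo := if l == 'N' then true else p.1
    (oneAgo, p.2, nSites, loc + 1)

-- nSites.remove(0): 0 is always present (sites are only added at loc ≥ 2), so the
-- KeyError branch (none) is unreachable; getD only makes the port total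
def findZSitesRemove0 (st : Bool × Bool × PySem.Set Int × Int) : List Int :=
  (PySem.Set.remove? st.2.2.1 0).getD st.2.2.1

def findZSites (correctSeq : String) : List Int :=
  findZSitesRemove0 (correctSeq.toList.foldl findZSitesStep (false, false, PySem.Set.ofList [(0 : Int)], 0))

-- ===== PORT B =====
def findZSites_alt (correctSeq : String) : List Int :=
  PySem.Set.ofList
    ((PySem.List.enumerate (correctSeq.toList.zip (PySem.List.slice correctSeq.toList (some 2) none)) 0).filterMap
      (fun p => if p.2.1 == 'N' && (p.2.2 == 'S' || p.2.2 == 'T')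
                then some (p.1 + 2) else none))

-- ===== PRECONDITION & SPEC =====
def Spec_findZSites (correctSeq : String) (out : List Int) : Prop := out = findZSites_alt correctSeq
instance (correctSeq : String) (out : List Int) : Decidable (Spec_findZSites correctSeq out) := by unfold Spec_findZSites; infer_instance

-- ===== CLAIM (what is proved, stated in full; the proofs are below) =====
def Claim_equal_findZSites : Prop := ∀ (correctSeq : String), Dom_findZSites correctSeq → Spec_findZSites correctSeq (findZSites correctSeq)

-- ===== LEMMAS AND PROOFS =====

-- the list of sites A's loop emits from a given flag state and position
def zsAux : List Char → Bool → Bool → Int → List Int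
  | [], _, _, _ => []
  | l :: rest, oneAgo, twoAgo, loc =>
    (if twoAgo && (l == 'S' || l == 'T') then [loc] else []) ++ zsAux rest (l == 'N') oneAgo (loc + 1)

-- the list of sites B emits from a list of (residue, residue-two-later) pairs
def pairAux : List (Char × Char) → Int → List Int
  | [], _ => []
  | (u, v) :: t, loc =>
    (if u == 'N' && (v == 'S' || v == 'T') then [loc] else []) ++ pairAux t (loc + 1)

theorem findZSitesStep_eq (oneAgo twoAgo : Bool) (s : PySem.Set Int) (loc : Int) (l : Char) :
    findZSitesStep (oneAgo, twoAgo, s, loc) l =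
      (l == 'N', oneAgo,
       (if twoAgo && (l == 'S' || l == 'T') then PySem.Set.add s loc else s), loc + 1) := by
  cases oneAgo <;> cases twoAgo <;> by_cases h : (l == 'S' || l == 'T') = true <;>
    simp [findZSitesStep, h] <;> (rw [Bool.eq_iff_iff]; simp)

theorem foldl_findZSitesStep (cs : List Char) :
    ∀ (oneAgo twoAgo : Bool) (s : PySem.Set Int) (loc : Int),
      (∀ x ∈ s, x ≤ loc) → (twoAgo = true → ∀ x ∈ s, x < loc) →
      (cs.foldl findZSitesStep (oneAgo, twoAgo, s, loc)).2.2.1 = s ++ zsAux cs oneAgo twoAgo loc := by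
  induction cs with
  | nil => intro _ _ s loc _ _; simp [zsAux]
  | cons l rest ih =>
    intro oneAgo twoAgo s loc h1 h2
    rw [List.foldl_cons, findZSitesStep_eq]
    cases htwo : twoAgo with
    | false =>
      rw [if_neg (by simp)]
      rw [ih (l == 'N') oneAgo s (loc + 1)
            (fun x hx => le_trans (h1 x hx) (by omega))
            (fun _ x hx => lt_of_le_of_lt (h1 x hx) (by omega))]
      simp [zsAux]
    | true =>
      cases hst : (l == 'S' || l == 'T') with
      | true =>
        have hnotmem : loc ∉ s := fun hm => absurd (h2 htwo loc hm) (lt_irrefl loc)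
        have hadd : PySem.Set.add s loc = s ++ [loc] := by
          simp only [PySem.Set.add, PySem.Set.contains]
          rw [if_neg]
          simpa using hnotmem
        rw [if_pos (by simp)]
        rw [hadd, ih (l == 'N') oneAgo (s ++ [loc]) (loc + 1)
              (by intro x hx
                  rcases List.mem_append.mp hx with h | h
                  · exact le_trans (h1 x h) (by omega)
                  · simp at h; omega)
              (by intro _ x hx
                  rcases List.mem_append.mp hx with h | h
                  · exact lt_of_le_of_lt (h1 x h) (by omega)
                  · simp at h; omega)]
        simp [zsAux, hst]
      | false =>
        rw [if_neg (by simp)]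
        rw [ih (l == 'N') oneAgo s (loc + 1)
              (fun x hx => le_trans (h1 x hx) (by omega))
              (fun _ x hx => lt_of_le_of_lt (h1 x hx) (by omega))]
        simp [zsAux, hst]

theorem findZSites_eq_zsAux (s : String) (h0 : (0 : Int) ∉ zsAux s.toList false false 0) :
    findZSites s = zsAux s.toList false false 0 := by
  unfold findZSites findZSitesRemove0
  rw [foldl_findZSitesStep s.toList false false (PySem.Set.ofList [(0 : Int)]) 0
        (by intro x hx
            have : x = 0 := by simpa [PySem.Set.ofList, PySem.Set.add, PySem.Set.empty] using hx
            omega)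
        (by intro h; cases h)]
  have he : PySem.Set.ofList [(0 : Int)] = [0] := rfl
  rw [he]
  simp [PySem.Set.remove?, PySem.Set.discard, PySem.Set.contains]
  intro a ha e
  exact h0 (e ▸ ha)

theorem zsAux_eq_pairAux (cs : List Char) :
    ∀ (p q : Char) (loc : Int),
      zsAux cs (q == 'N') (p == 'N') loc = pairAux ((p :: q :: cs).zip cs) loc := by
  induction cs with
  | nil => intro p q loc; simp [zsAux, pairAux]
  | cons c rest ih =>
    intro p q loc
    show (if (p == 'N') && (c == 'S' || c == 'T') then [loc] else []) ++
        zsAux rest (c == 'N') (q == 'N') (loc + 1) = _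
    rw [ih q c (loc + 1)]
    rfl

theorem pairAux_shift (cs : List Char) :
    pairAux (('A' :: 'A' :: cs).zip cs) 0 = pairAux (cs.zip (cs.drop 2)) 2 := by
  match cs with
  | [] => rfl
  | [c] => simp [pairAux]
  | c1 :: c2 :: rest =>
    show ([] : List Int) ++ ([] ++ pairAux ((c1 :: c2 :: rest).zip rest) (0 + 1 + 1)) = _
    norm_num

theorem filterMap_enumerate_eq_pairAux (ps : List (Char × Char)) :
    ∀ (s : Int),
      (PySem.List.enumerate ps s).filterMap
        (fun p => if p.2.1 == 'N' && (p.2.2 == 'S' || p.2.2 == 'T')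
                  then some (p.1 + 2) else none) = pairAux ps (s + 2) := by
  induction ps with
  | nil => intro s; simp [PySem.List.enumerate_nil, pairAux]
  | cons uv t ih =>
    intro s
    obtain ⟨u, v⟩ := uv
    rw [PySem.List.enumerate_cons, List.filterMap_cons, ih (s + 1)]
    have hshift : s + 1 + 2 = s + 2 + 1 := by ring
    cases h : (u == 'N' && (v == 'S' || v == 'T')) <;>
      simp [pairAux, h, hshift]

theorem pairAux_bounds (ps : List (Char × Char)) :
    ∀ (loc : Int), (∀ x ∈ pairAux ps loc, loc ≤ x) ∧ (pairAux ps loc).Pairwise (· < ·) := by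
  induction ps with
  | nil => intro loc; simp [pairAux]
  | cons uv t ih =>
    intro loc
    obtain ⟨u, v⟩ := uv
    obtain ⟨hb, hp⟩ := ih (loc + 1)
    cases h : (u == 'N' && (v == 'S' || v == 'T')) with
    | false =>
      refine ⟨?_, ?_⟩
      · intro x hx
        simp only [pairAux, h] at hx
        simp at hx
        exact le_trans (by omega) (hb x hx)
      · simpa [pairAux, h] using hp
    | true =>
      refine ⟨?_, ?_⟩
      · intro x hx
        simp only [pairAux, h] at hx
        simp at hx
        rcases hx with h' | h'
        · omega
        · exact le_trans (by omega) (hb x h')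
      · simp only [pairAux, h]
        exact List.Pairwise.cons (fun x hx => lt_of_lt_of_le (by omega) (hb x hx)) hp

theorem pairAux_nodup (ps : List (Char × Char)) (loc : Int) : (pairAux ps loc).Nodup :=
  ((pairAux_bounds ps loc).2).imp ne_of_lt

theorem findZSites_alt_eq_pairAux (s : String) :
    findZSites_alt s = pairAux (s.toList.zip (s.toList.drop 2)) 2 := by
  unfold findZSites_alt
  have hsl : PySem.List.slice s.toList (some 2) none = s.toList.drop 2 := by
    rw [show (some (2 : Int)) = some ((2 : Nat) : Int) from rfl, PySem.List.slice_from_natCast]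
  rw [hsl, filterMap_enumerate_eq_pairAux _ 0]
  norm_num
  exact PySem.Set.ofList_eq_self_of_nodup _ (pairAux_nodup _ _)

-- ===== VERDICT (by name: the statement is the Claim_ definition above) =====
theorem findZSites_spec : Claim_equal_findZSites := by
  intro s _
  unfold Spec_findZSites
  have hz : zsAux s.toList false false 0 = pairAux (s.toList.zip (s.toList.drop 2)) 2 := by
    rw [show zsAux s.toList false false 0 = zsAux s.toList ('A' == 'N') ('A' == 'N') 0 from rfl,
        zsAux_eq_pairAux, pairAux_shift]
  have h0 : (0 : Int) ∉ zsAux s.toList false false 0 := by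
    rw [hz]
    intro hm
    have := (pairAux_bounds (s.toList.zip (s.toList.drop 2)) 2).1 0 hm
    omega
  rw [findZSites_eq_zsAux s h0, findZSites_alt_eq_pairAux, hz]
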